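-- pv_equiv track=rewrite | github.com/BricksAndPieces/AdventOfCode | 2015/days/day25.py | find_code_num
-- ===== SOURCE A (Python) =====
-- def find_code_num(row, col):
--     i = r = c = 1
--     while r != row or c != col:
--         if r == 1:
--             r = c + 1
--             c = 1
--         else:
--             r -= 1
--             c += 1
--
--         i += 1
--
--     return i
-- ===== SOURCE B (Python) =====
-- def find_code_num(row, col):
--     d = row + col - 1
--     return d * (d - 1) // 2 + col
-- ===== Notes on version B (the rewrite author's own statement) =====
-- stated objective: faster
-- what changed: Replaces the step-by-step diagonal walk (one loop iteration per visited cell) with the closed-form triangular-number formula d=row+col-1; d*(d-1)//2+col.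
-- outside the precondition, e.g. on find_code_num(0, 1): A does not finish within the time limit, B returns 1
import Mathlib
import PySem

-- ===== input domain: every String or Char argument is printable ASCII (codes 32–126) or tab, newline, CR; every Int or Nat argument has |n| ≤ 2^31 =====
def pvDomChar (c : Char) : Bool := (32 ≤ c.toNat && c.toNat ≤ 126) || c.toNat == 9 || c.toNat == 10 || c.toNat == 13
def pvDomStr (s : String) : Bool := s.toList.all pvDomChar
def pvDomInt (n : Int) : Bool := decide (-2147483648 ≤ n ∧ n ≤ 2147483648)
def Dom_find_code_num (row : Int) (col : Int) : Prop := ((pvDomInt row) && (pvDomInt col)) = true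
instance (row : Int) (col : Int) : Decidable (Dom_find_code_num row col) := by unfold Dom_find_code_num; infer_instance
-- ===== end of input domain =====

-- B replaces A's cell-by-cell diagonal walk with the closed-form triangular-number formula (O(1) instead of one loop step per visited cell).

-- ===== PORT A =====
-- literal port of A's while loop; 'fuel' is a totality guard only (large enough under Pre_, proved below)
def findCodeLoop : Nat → Int → Int → Int → Int → Int → Int
  | 0, i, _, _, _, _ => i
  | fuel + 1, i, r, c, row, col =>
    if r ≠ row ∨ c ≠ col then
      if r = 1 then findCodeLoop fuel (i + 1) (c + 1) 1 row col
      else findCodeLoop fuel (i + 1) (r - 1) (c + 1) row col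
    else i

def find_code_num (row : Int) (col : Int) : Int :=
  findCodeLoop ((row + col) * (row + col)).toNat 1 1 1 row col

-- ===== PORT B =====
def find_code_num_alt (row : Int) (col : Int) : Int :=
  let d := row + col - 1
  PySem.Int.floordiv (d * (d - 1)) 2 + col

-- ===== PRECONDITION & SPEC =====
-- A's while loop never terminates unless row ≥ 1 and col ≥ 1 (the walk only visits cells with positive coordinates)
def Pre_find_code_num (row : Int) (col : Int) : Prop := 1 ≤ row ∧ 1 ≤ col
instance (row : Int) (col : Int) : Decidable (Pre_find_code_num row col) := by unfold Pre_find_code_num; infer_instance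
def pvWitness_find_code_num : Int × Int := (3, 4)
def Spec_find_code_num (row : Int) (col : Int) (out : Int) : Prop := out = find_code_num_alt row col
instance (row : Int) (col : Int) (out : Int) : Decidable (Spec_find_code_num row col out) := by unfold Spec_find_code_num; infer_instance

-- ===== CLAIM =====
def Claim_equal_find_code_num : Prop := ∀ (row : Int) (col : Int), Dom_find_code_num row col → Pre_find_code_num row col → Spec_find_code_num row col (find_code_num row col)

-- ===== LEMMAS AND PROOFS =====

-- doubled sequence index of cell (r, c) in the diagonal order (2 * (triangular formula))
def pvF (r c : Int) : Int := (r + c - 1) * (r + c - 2) + 2 * c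

lemma pvF_even (r c : Int) : ∃ k : Int, pvF r c = 2 * k := by
  have h : Even ((r + c - 2) * (r + c - 2 + 1)) := Int.even_mul_succ_self (r + c - 2)
  rcases h with ⟨k, hk⟩
  exact ⟨k + c, by unfold pvF; ring_nf; ring_nf at hk; omega⟩

lemma pvF_inj (r c row col : Int) (hr : 1 ≤ r) (hc : 1 ≤ c) (hrow : 1 ≤ row)
    (hcol : 1 ≤ col) (hF : pvF r c = pvF row col) : r = row ∧ c = col := by
  unfold pvF at hF
  rcases lt_trichotomy (r + c) (row + col) with h | h | h
  · exfalso
    have h1 : (r + c - 1) * (r + c - 2) ≤ (row + col - 2) * (row + col - 3) := by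
      apply mul_le_mul (by omega) (by omega) (by omega) (by omega)
    nlinarith
  · constructor <;> nlinarith
  · exfalso
    have h1 : (row + col - 1) * (row + col - 2) ≤ (r + c - 2) * (r + c - 3) := by
      apply mul_le_mul (by omega) (by omega) (by omega) (by omega)
    nlinarith

lemma findCodeLoop_eq (row col : Int) (hrow : 1 ≤ row) (hcol : 1 ≤ col) :
    ∀ (fuel : Nat) (i r c : Int), 1 ≤ r → 1 ≤ c → pvF r c ≤ pvF row col →
      pvF row col - pvF r c ≤ 2 * (fuel : Int) →
      findCodeLoop fuel i r c row col = i + (pvF row col - pvF r c) / 2 := by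
  intro fuel
  induction fuel with
  | zero =>
    intro i r c hr hc hle hfuel
    have := pvF_even r c
    have := pvF_even row col
    simp only [findCodeLoop]
    omega
  | succ fuel ih =>
    intro i r c hr hc hle hfuel
    by_cases heq : r = row ∧ c = col
    · obtain ⟨h1, h2⟩ := heq
      subst h1; subst h2
      simp [findCodeLoop]
    · have hne : r ≠ row ∨ c ≠ col := by tauto
      have hFne : pvF r c ≠ pvF row col := by
        intro h
        exact heq (pvF_inj r c row col hr hc hrow hcol h)
      have hlt : pvF r c < pvF row col := lt_of_le_of_ne hle hFne
      obtain ⟨k1, hk1⟩ := pvF_even r c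
      obtain ⟨k2, hk2⟩ := pvF_even row col
      by_cases hr1 : r = 1
      · have hstep : pvF (c + 1) 1 = pvF r c + 2 := by
          subst hr1; unfold pvF; ring
        have := ih (i + 1) (c + 1) 1 (by omega) (by omega) (by omega) (by omega)
        simp only [findCodeLoop, if_pos hne, if_pos hr1]
        rw [this]
        omega
      · have hstep : pvF (r - 1) (c + 1) = pvF r c + 2 := by
          unfold pvF; ring
        have hr2 : 1 ≤ r - 1 := by omega
        have := ih (i + 1) (r - 1) (c + 1) hr2 (by omega) (by omega) (by omega)
        simp only [findCodeLoop, if_pos hne, if_neg hr1]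
        rw [this]
        omega

lemma pvF_le_sq (row col : Int) (hrow : 1 ≤ row) (hcol : 1 ≤ col) :
    pvF row col ≤ (row + col) * (row + col) := by
  unfold pvF; nlinarith

-- ===== VERDICT =====
theorem find_code_num_spec : Claim_equal_find_code_num := by
  intro row col _ hpre
  obtain ⟨hrow, hcol⟩ := hpre
  unfold Spec_find_code_num find_code_num find_code_num_alt
  have hF11 : pvF 1 1 = 2 := by unfold pvF; ring
  have hle : pvF 1 1 ≤ pvF row col := by
    unfold pvF; nlinarith
  have hsq := pvF_le_sq row col hrow hcol
  have htn : (((row + col) * (row + col)).toNat : Int) = (row + col) * (row + col) := by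
    have : 0 ≤ (row + col) * (row + col) := mul_self_nonneg _
    omega
  have hmain := findCodeLoop_eq row col hrow hcol ((row + col) * (row + col)).toNat
    1 1 1 le_rfl le_rfl hle (by omega)
  rw [hmain, hF11]
  show _ = PySem.Int.floordiv ((row + col - 1) * (row + col - 1 - 1)) 2 + col
  rw [PySem.Int.floordiv_eq_ediv_of_pos (by omega : (0:Int) < 2)]
  obtain ⟨k2, hk2⟩ := pvF_even row col
  have hexp : pvF row col = (row + col - 1) * (row + col - 1 - 1) + 2 * col := by
    unfold pvF; ring
  omega
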